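-- pv_equiv track=rewrite | github.com/dang3r/nl | newslister/proxy/aws.py | assign_instances
-- ===== SOURCE A (Python) =====
-- region_limit = 20
--
-- def assign_instances(regions, count):
--     """Assign count instances to the given aws regions"""
--     if count > len(regions) * region_limit:
--         raise Exception('Too many instances!')
--
--     d = {}
--     for region in regions:
--         if count == 0:
--             break
--         size = min(count, region_limit)
--         count -= size
--         d[region] = size
--     return d
-- ===== SOURCE B (Python) =====
-- region_limit = 20
--
-- def assign_instances(regions, count):
--     """Assign count instances to the given aws regions"""
--     if count > len(regions) * region_limit:
--         raise Exception('Too many instances!')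
--
--     full, rem = divmod(count, region_limit)
--     d = {region: region_limit for region in regions[:full]}
--     if rem:
--         d[regions[full]] = rem
--     return d
-- ===== Notes on version B (the rewrite author's own statement) =====
-- stated objective: simpler
-- what changed: Replaced the running-accumulator loop with min() and break by up-front arithmetic (full, rem = divmod(count, region_limit)): a dict comprehension gives region_limit to the first `full` regions and the remainder goes to regions[full].
-- outside the precondition, e.g. on assign_instances(['a'], -5): A returns {'a': -5}, B returns {'a': 15}
import Mathlib
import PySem

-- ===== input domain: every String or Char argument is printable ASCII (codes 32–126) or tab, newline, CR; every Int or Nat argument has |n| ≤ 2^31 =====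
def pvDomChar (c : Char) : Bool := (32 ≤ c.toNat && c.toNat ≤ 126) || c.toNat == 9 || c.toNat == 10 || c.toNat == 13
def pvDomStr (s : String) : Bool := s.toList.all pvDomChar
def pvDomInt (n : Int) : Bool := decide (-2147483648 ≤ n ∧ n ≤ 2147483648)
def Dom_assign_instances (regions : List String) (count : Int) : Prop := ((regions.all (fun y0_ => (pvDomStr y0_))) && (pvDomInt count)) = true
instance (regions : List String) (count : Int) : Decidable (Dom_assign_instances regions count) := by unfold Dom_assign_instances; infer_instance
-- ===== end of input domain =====

-- ===== PORT A =====
-- B replaces A's running-accumulator loop (min/break) by up-front divmod arithmetic; objective: simpler.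
-- Loop of A: for region in regions: break on count==0; size = min(count, 20); count -= size; d[region] = size
def aLoop (regions : List String) (count : Int) (d : PySem.Dict String Int) : PySem.Dict String Int :=
  match regions with
  | [] => d
  | r :: rs =>
    if count = 0 then d
    else
      let size := min count 20
      aLoop rs (count - size) (d.insert r size)

def assign_instances (regions : List String) (count : Int) : List (String × Int) :=
  if count > (regions.length : Int) * 20 then []  -- Python raises Exception here; excluded by Pre_
  else (aLoop regions count PySem.Dict.empty).items

-- ===== PORT B =====
-- full, rem = divmod(count, 20); {region: 20 for region in regions[:full]}; if rem: d[regions[full]] = rem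
def bBody (regions : List String) (count : Int) (d : PySem.Dict String Int) : PySem.Dict String Int :=
  let full := PySem.Int.floordiv count 20
  let rem := PySem.Int.mod count 20
  let d1 := (PySem.List.slice regions none (some full)).foldl (fun acc r => acc.insert r (20 : Int)) d
  if rem ≠ 0 then
    match PySem.List.pyGet? regions full with
    | some r => d1.insert r rem
    | none => d1  -- IndexError; unreachable under Pre_
  else d1

def assign_instances_alt (regions : List String) (count : Int) : List (String × Int) :=
  if count > (regions.length : Int) * 20 then []  -- Python raises Exception here; excluded by Pre_
  else (bBody regions count PySem.Dict.empty).items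

-- ===== PRECONDITION & SPEC =====
-- Pre_ excludes count > 20*len(regions), where A raises Exception, and additionally negative counts,
-- which are outside the function's natural domain (A would assign a single negative-size allocation there).
def Pre_assign_instances (regions : List String) (count : Int) : Prop :=
  0 ≤ count ∧ count ≤ (regions.length : Int) * 20
instance (regions : List String) (count : Int) : Decidable (Pre_assign_instances regions count) := by
  unfold Pre_assign_instances; infer_instance

def pvWitness_assign_instances : List String × Int := (["us-east-1", "us-west-2"], 25)

def Spec_assign_instances (regions : List String) (count : Int) (out : List (String × Int)) : Prop := out = assign_instances_alt regions count
instance (regions : List String) (count : Int) (out : List (String × Int)) : Decidable (Spec_assign_instances regions count out) := by unfold Spec_assign_instances; infer_instance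

-- ===== CLAIM (what is proved, stated in full; the proofs are below) =====
def Claim_equal_assign_instances : Prop := ∀ (regions : List String) (count : Int), Dom_assign_instances regions count → Pre_assign_instances regions count → Spec_assign_instances regions count (assign_instances regions count)

-- ===== LEMMAS AND PROOFS =====
theorem aLoop_zero (xs : List String) (d : PySem.Dict String Int) : aLoop xs 0 d = d := by
  cases xs <;> simp [aLoop]

theorem loop_eq (regions : List String) : ∀ (count : Int) (d : PySem.Dict String Int),
    0 ≤ count → count ≤ (regions.length : Int) * 20 →
    aLoop regions count d = bBody regions count d := by
  induction regions with
  | nil =>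
    intro count d h0 h2
    simp only [List.length_nil, Nat.cast_zero, zero_mul] at h2
    have hc : count = 0 := le_antisymm h2 h0
    subst hc
    simp [aLoop, bBody, PySem.List.slice]
  | cons r rs ih =>
    intro count d h0 h2
    have hfd : PySem.Int.floordiv count 20 = count / 20 :=
      PySem.Int.floordiv_eq_ediv_of_pos (by norm_num)
    have hmd : PySem.Int.mod count 20 = count % 20 :=
      PySem.Int.mod_eq_emod_of_pos (by norm_num)
    obtain ⟨n, hn⟩ : ∃ n : Nat, count / 20 = (n : Int) :=
      ⟨(count / 20).toNat, (Int.toNat_of_nonneg (Int.ediv_nonneg h0 (by norm_num))).symm⟩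
    rw [bBody, hfd, hmd, hn, PySem.List.slice_to_natCast]
    by_cases hc0 : count = 0
    · subst hc0
      have hn0 : n = 0 := by omega
      subst hn0
      simp [aLoop]
    · by_cases hlt : count < 20
      · -- 0 < count < 20 : the head region takes everything
        have hn0 : n = 0 := by omega
        subst hn0
        have hr : count % 20 = count := by omega
        rw [aLoop]
        simp only [if_neg hc0]
        have hmin : min count 20 = count := by omega
        rw [hmin, sub_self, aLoop_zero]
        simp [hr, hc0]
      · -- 20 ≤ count : head region takes 20, recurse
        have h20 : 20 ≤ count := by omega
        rw [aLoop]
        simp only [if_neg hc0]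
        have hmin : min count 20 = 20 := by omega
        rw [hmin]
        have hlen : count - 20 ≤ (rs.length : Int) * 20 := by
          simp only [List.length_cons, Nat.cast_add, Nat.cast_one] at h2; omega
        rw [ih (count - 20) (d.insert r 20) (by omega) hlen]
        -- relate the two bBody unfoldings
        have hfd' : PySem.Int.floordiv (count - 20) 20 = (count - 20) / 20 :=
          PySem.Int.floordiv_eq_ediv_of_pos (by norm_num)
        have hmd' : PySem.Int.mod (count - 20) 20 = (count - 20) % 20 :=
          PySem.Int.mod_eq_emod_of_pos (by norm_num)
        obtain ⟨m, hmn⟩ : ∃ m : Nat, n = m + 1 := ⟨n - 1, by omega⟩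
        have hdiv' : (count - 20) / 20 = (m : Int) := by omega
        have hmod' : (count - 20) % 20 = count % 20 := by omega
        rw [bBody, hfd', hmd', hdiv', hmod', PySem.List.slice_to_natCast, hmn]
        simp only [List.take_succ_cons, List.foldl_cons]
        by_cases hrm : count % 20 ≠ 0
        · simp only [if_pos hrm, PySem.List.pyGet?_natCast, List.getElem?_cons_succ]
        · simp only [if_neg hrm]

-- ===== VERDICT (by name: the statement is the Claim_ definition above) =====
theorem assign_instances_spec : Claim_equal_assign_instances := by
  intro regions count _ hpre
  obtain ⟨h0, h2⟩ := hpre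
  have hng : ¬ (count > (regions.length : Int) * 20) := by omega
  show assign_instances regions count = assign_instances_alt regions count
  rw [assign_instances, assign_instances_alt, if_neg hng, if_neg hng,
    loop_eq regions count PySem.Dict.empty h0 h2]
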